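-- pv_equiv track=rewrite | github.com/blaisewang/leetcode | medium/1272.删除区间.py | removeInterval
-- ===== SOURCE A (Python) =====
-- from typing import List
--
-- def removeInterval(intervals: List[List[int]], toBeRemoved: List[int]) -> List[List[int]]:
--     r = []
--
--     tl, tr = toBeRemoved
--     for x, y in intervals:
--         if tl >= y or tr <= x:
--             r.append([x, y])
--         else:
--             if tl > x:
--                 r.append([x, tl])
--             if tr < y:
--                 r.append([tr, y])
--
--     return r
-- ===== SOURCE B (Python) =====
-- from typing import List
--
-- def removeInterval(intervals: List[List[int]], toBeRemoved: List[int]) -> List[List[int]]: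
--     tl, tr = toBeRemoved
--
--     def go(i):
--         if i == len(intervals):
--             return []
--         x, y = intervals[i]
--         rest = go(i + 1)
--         if tr <= x or tl >= y:           # no overlap: keep the interval whole
--             return [[x, y]] + rest
--         if tl <= x and tr >= y:          # fully covered: drop it
--             return rest
--         if tl <= x:                      # left part covered: keep the right remainder
--             return [[tr, y]] + rest
--         if tr >= y:                      # right part covered: keep the left remainder
--             return [[x, tl]] + rest
--         return [[x, tl], [tr, y]] + rest # removal strictly inside: split in two
--
--     return go(0)
-- ===== Notes on version B (the rewrite author's own statement) =====
-- stated objective: alternative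
-- what changed: Replaces the loop with an accumulator and the overlap-test-plus-two-independent-conditional-appends by a recursive descent that builds the result back-to-front by consing, classifying each interval into one of five explicit cases (disjoint / fully covered / left overlap / right overlap / split).
import Mathlib
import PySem

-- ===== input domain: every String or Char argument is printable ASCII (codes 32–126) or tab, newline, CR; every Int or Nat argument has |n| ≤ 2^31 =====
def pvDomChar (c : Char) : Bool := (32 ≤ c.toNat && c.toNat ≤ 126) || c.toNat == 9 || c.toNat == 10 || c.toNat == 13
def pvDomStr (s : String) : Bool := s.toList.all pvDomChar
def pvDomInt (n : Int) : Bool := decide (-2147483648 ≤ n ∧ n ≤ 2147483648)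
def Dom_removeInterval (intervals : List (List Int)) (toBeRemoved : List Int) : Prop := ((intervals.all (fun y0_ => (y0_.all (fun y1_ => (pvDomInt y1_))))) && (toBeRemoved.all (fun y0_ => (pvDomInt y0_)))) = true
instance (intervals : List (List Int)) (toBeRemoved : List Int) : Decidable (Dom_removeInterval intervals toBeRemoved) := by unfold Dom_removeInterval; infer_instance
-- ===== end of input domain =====

-- B replaces A's accumulator loop (overlap test + two independent conditional appends) by a
-- recursive descent that builds the result back-to-front, classifying each interval into one of
-- five explicit cases (objective: alternative).

-- ===== PORT A =====
-- 'tl, tr = toBeRemoved' raises ValueError unless toBeRemoved has exactly 2 elements, and so does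
-- 'for x, y in intervals' for a malformed element; those inputs are excluded by Pre_ below.
def removeInterval (intervals : List (List Int)) (toBeRemoved : List Int) : List (List Int) :=
  match toBeRemoved with
  | [tl, tr] =>
      intervals.foldl (fun r iv =>
        match iv with
        | [x, y] =>
            if tl ≥ y ∨ tr ≤ x then r ++ [[x, y]]
            else
              let r1 := if tl > x then r ++ [[x, tl]] else r
              if tr < y then r1 ++ [[tr, y]] else r1
        | _ => r) []
  | _ => []

-- ===== PORT B =====
-- Source B's 'go': recursion over the remaining suffix of intervals, consing pieces onto the
-- recursively-built tail, with a five-way classification of each interval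
def pvGo (tl tr : Int) : List (List Int) → List (List Int)
  | [] => []
  | iv :: tail =>
      let rest := pvGo tl tr tail
      if iv.length = 2 then
        let x := iv.getD 0 0
        let y := iv.getD 1 0
        if tr ≤ x ∨ tl ≥ y then [x, y] :: rest
        else if tl ≤ x ∧ tr ≥ y then rest
        else if tl ≤ x then [tr, y] :: rest
        else if tr ≥ y then [x, tl] :: rest
        else [x, tl] :: [tr, y] :: rest
      else rest  -- Python raises ValueError here; outside Pre_

def removeInterval_alt (intervals : List (List Int)) (toBeRemoved : List Int) : List (List Int) :=
  if toBeRemoved.length = 2 then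
    pvGo (toBeRemoved.getD 0 0) (toBeRemoved.getD 1 0) intervals
  else []  -- Python raises ValueError here; outside Pre_

-- ===== PRECONDITION & SPEC =====
-- Pre_ excludes exactly the inputs on which Python's tuple unpacking raises ValueError:
-- toBeRemoved or some element of intervals does not have exactly 2 elements.
def Pre_removeInterval (intervals : List (List Int)) (toBeRemoved : List Int) : Prop :=
  toBeRemoved.length = 2 ∧ intervals.all (fun iv => iv.length == 2) = true
instance (intervals : List (List Int)) (toBeRemoved : List Int) : Decidable (Pre_removeInterval intervals toBeRemoved) := by unfold Pre_removeInterval; infer_instance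

def pvWitness_removeInterval : List (List Int) × List Int := ([[0, 2], [3, 7]], [1, 4])

def Spec_removeInterval (intervals : List (List Int)) (toBeRemoved : List Int) (out : List (List Int)) : Prop := out = removeInterval_alt intervals toBeRemoved
instance (intervals : List (List Int)) (toBeRemoved : List Int) (out : List (List Int)) : Decidable (Spec_removeInterval intervals toBeRemoved out) := by unfold Spec_removeInterval; infer_instance

-- ===== CLAIM (what is proved, stated in full; the proofs are below) =====
def Claim_equal_removeInterval : Prop := ∀ (intervals : List (List Int)) (toBeRemoved : List Int), Dom_removeInterval intervals toBeRemoved → Pre_removeInterval intervals toBeRemoved → Spec_removeInterval intervals toBeRemoved (removeInterval intervals toBeRemoved)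

-- ===== LEMMAS AND PROOFS =====

-- A's per-interval emission equals B's five-way classification, for all integers
theorem piece_eq (tl tr x y : Int) :
    (if tl ≥ y ∨ tr ≤ x then [[x, y]]
     else (if tl > x then [[x, tl]] else []) ++ (if tr < y then [[tr, y]] else []))
    = (if tr ≤ x ∨ tl ≥ y then [[x, y]]
       else if tl ≤ x ∧ tr ≥ y then []
       else if tl ≤ x then [[tr, y]]
       else if tr ≥ y then [[x, tl]]
       else [[x, tl], [tr, y]]) := by
  split_ifs <;> first | rfl | omega

-- A's accumulator loop equals the prefix plus B's back-to-front recursion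
theorem loop_eq (tl tr : Int) :
    ∀ (l : List (List Int)) (r : List (List Int)),
      (∀ iv ∈ l, iv.length = 2) →
      l.foldl (fun r iv =>
        match iv with
        | [x, y] =>
            if tl ≥ y ∨ tr ≤ x then r ++ [[x, y]]
            else
              let r1 := if tl > x then r ++ [[x, tl]] else r
              if tr < y then r1 ++ [[tr, y]] else r1
        | _ => r) r
      = r ++ pvGo tl tr l := by
  intro l
  induction l with
  | nil => intro r _; simp [pvGo]
  | cons iv rest ih =>
    intro r hlen
    have hiv : iv.length = 2 := hlen iv (List.mem_cons_self ..)
    match iv, hiv with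
    | [x, y], _ =>
      rw [List.foldl_cons, ih _ (fun j hj => hlen j (List.mem_cons_of_mem _ hj))]
      show (if tl ≥ y ∨ tr ≤ x then r ++ [[x, y]]
            else
              let r1 := if tl > x then r ++ [[x, tl]] else r
              if tr < y then r1 ++ [[tr, y]] else r1) ++ pvGo tl tr rest
           = r ++ pvGo tl tr ([x, y] :: rest)
      have hstep :
          (if tl ≥ y ∨ tr ≤ x then r ++ [[x, y]]
           else
             let r1 := if tl > x then r ++ [[x, tl]] else r
             if tr < y then r1 ++ [[tr, y]] else r1)
          = r ++ (if tl ≥ y ∨ tr ≤ x then [[x, y]]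
                  else (if tl > x then [[x, tl]] else []) ++
                       (if tr < y then [[tr, y]] else [])) := by
        split_ifs <;> simp
      rw [hstep, piece_eq tl tr x y, List.append_assoc]
      show r ++ ((if tr ≤ x ∨ tl ≥ y then [[x, y]]
                  else if tl ≤ x ∧ tr ≥ y then []
                  else if tl ≤ x then [[tr, y]]
                  else if tr ≥ y then [[x, tl]]
                  else [[x, tl], [tr, y]]) ++ pvGo tl tr rest)
           = r ++ pvGo tl tr ([x, y] :: rest)
      simp only [pvGo, List.getD_cons_zero, List.getD_cons_succ, List.length_cons,
        List.length_nil, Nat.reduceAdd, reduceIte]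
      split_ifs <;> first | rfl | omega

-- ===== VERDICT (by name: the statement is the Claim_ definition above) =====
theorem removeInterval_spec : Claim_equal_removeInterval := by
  intro intervals toBeRemoved _ hpre
  obtain ⟨hlen, hall⟩ := hpre
  unfold Spec_removeInterval removeInterval removeInterval_alt
  have h2 : ∀ iv ∈ intervals, iv.length = 2 := by
    intro iv hiv
    have := List.all_eq_true.mp hall iv hiv
    simpa using this
  match toBeRemoved, hlen with
  | [tl, tr], _ =>
      simpa using loop_eq tl tr intervals [] h2
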